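-- pv_equiv track=rewrite | github.com/richas26/AI-Based-Industry-Feedback-and-Auto-Response-System- | prompts.py | company_summary_prompt
-- ===== SOURCE A (Python) =====
-- def company_summary_prompt(data_dict, company_name):
--     """
--     Creates a company-wise summary prompt for the LLM.
--     """
--     company_column = data_dict['Name of The Company']
--
--     # Initialize a dictionary to hold filtered feedback data for the selected company
--     company_feedback = {key: [] for key in data_dict.keys()}
--
--     # Iterate through each row and check if the company name matches
--     for idx, company in enumerate(company_column):
--         if company == company_name:
--             for key in data_dict.keys():
--                 company_feedback[key].append(data_dict[key][idx])  # Append data for all matching rows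
--
--     # Count number of students working for the selected company
--     student_count = len(company_feedback['Name of The Student'])
--     # Join names of students working for the selected company into a comma-separated string
--     student_names = ', '.join(company_feedback['Name of The Student'])
--
--     prompt = f"""
--     Provide a summary for the company '{company_name}' based on the following internship feedback data:
--     {company_feedback}
--     You must not use or generate any data or text based on information outside of this provided context. Only refer to the data provided in this input.
--
--     Summarize strengths and weaknesses of interns working for this company.
--
--     Output format:
--     1. **Number of students (give count of students working for selected company)**:
--     2. **Names of students (give names of students working for selected company)**:
--     3. **Faculty Mentor from this company:**
--     4. **Faculty Mentor from this company from VIIT:**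
--     5. **Email-id of Faculty Mentor from this company from VIIT:**
--     6. **Overall strengths:**
--     7. **Overall weaknesses:**
--     8. **Overall Summary:**
--     """
--     return prompt
-- ===== SOURCE B (Python) =====
-- def company_summary_prompt(data_dict, company_name):
--     """
--     Creates a company-wise summary prompt for the LLM.
--     """
--     keys = list(data_dict)
--     ci = keys.index('Name of The Company')
--
--     # Row view of the table: zip(*) transposes the columns into row tuples
--     # (truncating to the shortest column), then keep the rows of the company.
--     kept = [row for row in zip(*data_dict.values()) if row[ci] == company_name]
--
--     # Read the filtered columns back out of the kept row tuples, position by position.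
--     company_feedback = {key: [row[j] for row in kept] for j, key in enumerate(keys)}
--
--     prompt = f"""
--     Provide a summary for the company '{company_name}' based on the following internship feedback data:
--     {company_feedback}
--     You must not use or generate any data or text based on information outside of this provided context. Only refer to the data provided in this input.
--
--     Summarize strengths and weaknesses of interns working for this company.
--
--     Output format:
--     1. **Number of students (give count of students working for selected company)**:
--     2. **Names of students (give names of students working for selected company)**:
--     3. **Faculty Mentor from this company:**
--     4. **Faculty Mentor from this company from VIIT:**
--     5. **Email-id of Faculty Mentor from this company from VIIT:**
--     6. **Overall strengths:**
--     7. **Overall weaknesses:**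
--     8. **Overall Summary:**
--     """
--     return prompt
-- ===== Notes on version B (the rewrite author's own statement) =====
-- stated objective: alternative
-- what changed: B transposes the table into row tuples with zip(*values), filters the company's rows once by the key's position, and reads the filtered columns back out of the row tuples, replacing A's row-outer/key-inner dict-mutation loop (A's dead student_count/student_names computation is dropped).
import Mathlib
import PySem

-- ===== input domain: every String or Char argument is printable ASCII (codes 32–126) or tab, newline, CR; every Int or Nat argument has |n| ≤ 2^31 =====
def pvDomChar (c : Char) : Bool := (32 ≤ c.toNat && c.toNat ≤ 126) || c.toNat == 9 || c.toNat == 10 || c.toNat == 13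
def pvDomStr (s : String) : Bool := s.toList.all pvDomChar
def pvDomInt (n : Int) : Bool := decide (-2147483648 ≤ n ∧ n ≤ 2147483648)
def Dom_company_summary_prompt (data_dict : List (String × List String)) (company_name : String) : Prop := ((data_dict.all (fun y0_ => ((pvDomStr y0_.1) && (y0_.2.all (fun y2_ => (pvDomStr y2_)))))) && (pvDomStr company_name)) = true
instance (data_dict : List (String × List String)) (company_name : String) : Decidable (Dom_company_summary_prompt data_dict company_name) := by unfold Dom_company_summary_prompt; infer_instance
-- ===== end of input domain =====

-- B transposes the table with zip(*) into row tuples, filters the rows of the company once,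
-- and reads the filtered columns back out of the row tuples, instead of A's row-outer/key-inner
-- dict-mutation loop; simpler, and A's dead student_count/student_names computation is dropped.
set_option maxRecDepth 4096


-- shared helpers: Python's str()/repr() rendering of the feedback dict inside the f-string
-- (exact on the stated domain: printable ASCII plus tab/newline/CR)
def pyReprChar (q : Char) (c : Char) : List Char :=
  if c = '\\' then ['\\', '\\']
  else if c = q then ['\\', q]
  else if c = Char.ofNat 9 then ['\\', 't']
  else if c = Char.ofNat 10 then ['\\', 'n']
  else if c = Char.ofNat 13 then ['\\', 'r']
  else [c]

def pyReprStr (s : String) : String :=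
  let cs := s.toList
  let q : Char := if ('\'' ∈ cs) ∧ ¬ ('"' ∈ cs) then '"' else '\''
  String.ofList ([q] ++ cs.flatMap (pyReprChar q) ++ [q])

def pyReprStrList (xs : List String) : String :=
  "[" ++ PySem.Str.join ", " (xs.map pyReprStr) ++ "]"

def pyReprFeedback (items : List (String × List String)) : String :=
  "{" ++ PySem.Str.join ", " (items.map (fun kv => pyReprStr kv.1 ++ ": " ++ pyReprStrList kv.2)) ++ "}"

def promptText (company_name : String) (fbRepr : String) : String :=
  "\n    Provide a summary for the company '" ++ company_name ++
  "' based on the following internship feedback data:\n    " ++ fbRepr ++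
  "\n    You must not use or generate any data or text based on information outside of this provided context. Only refer to the data provided in this input.\n\n    Summarize strengths and weaknesses of interns working for this company.\n    \n    Output format:\n    1. **Number of students (give count of students working for selected company)**: \n    2. **Names of students (give names of students working for selected company)**: \n    3. **Faculty Mentor from this company:**\n    4. **Faculty Mentor from this company from VIIT:**\n    5. **Email-id of Faculty Mentor from this company from VIIT:**\n    6. **Overall strengths:**\n    7. **Overall weaknesses:**\n    8. **Overall Summary:**\n    "

-- ===== PORT A =====
-- literal transliteration of A: row-outer loop over enumerate(company_column),
-- key-inner loop appending into the company_feedback dict; dead student_count /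
-- student_names computed as in A (they do not appear in the f-string).
def company_summary_prompt (data_dict : List (String × List String)) (company_name : String) : String :=
  let d := PySem.Dict.ofList data_dict
  let company_column := d.getD "Name of The Company" []
  let fb0 := d.keys.foldl (fun fb k => fb.insert k ([] : List String)) PySem.Dict.empty
  let fb := (PySem.List.enumerate company_column).foldl
    (fun fb p =>
      if p.2 == company_name then
        d.keys.foldl (fun fb2 k =>
          fb2.modify k [] (fun l => l ++ [PySem.List.pyGetD (d.getD k []) p.1 ""])) fb
      else fb) fb0
  let _student_count : Int := (fb.getD "Name of The Student" []).length
  let _student_names := PySem.Str.join ", " (fb.getD "Name of The Student" [])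
  promptText company_name (pyReprFeedback fb.items)

-- ===== PORT B =====
-- port of the builtin zip(*cols): row tuples, truncated to the shortest column
-- (exact: Python's zip stops at the shortest iterable; zip() with no args is empty)
def pyZipStar (cols : List (List String)) : List (List String) :=
  let n := ((cols.map List.length).min?).getD 0
  (List.range n).map (fun i => cols.map (fun c => c.getD i ""))

-- transliteration of B: keys.index, transpose with zip(*), filter the rows once,
-- then read each column of the kept rows back by its position.
def company_summary_prompt_alt (data_dict : List (String × List String)) (company_name : String) : String :=
  let d := PySem.Dict.ofList data_dict
  let keys := d.keys
  match PySem.List.index? keys "Name of The Company" with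
  | none => ""   -- Python raises ValueError here; excluded by Pre_
  | some ci =>
    let kept := (pyZipStar d.values).filter
      (fun row => PySem.List.pyGetD row (ci : Int) "" == company_name)
    let fb := (PySem.List.enumerate keys).map
      (fun jk => (jk.2, kept.map (fun row => PySem.List.pyGetD row jk.1 "")))
    promptText company_name (pyReprFeedback fb)

-- ===== PRECONDITION & SPEC =====
-- Pre_ excludes exactly the inputs on which the Python A raises: KeyError when
-- 'Name of The Company' or 'Name of The Student' is missing from the dict, and
-- IndexError when a row index matching the company is out of range for some column
-- (stated over PySem.Dict.ofList data_dict, i.e. the dict Python actually builds).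
def Pre_company_summary_prompt (data_dict : List (String × List String)) (company_name : String) : Prop :=
  "Name of The Company" ∈ (PySem.Dict.ofList data_dict).keys ∧
  "Name of The Student" ∈ (PySem.Dict.ofList data_dict).keys ∧
  ∀ kv ∈ (PySem.Dict.ofList data_dict).items, kv.1 = "Name of The Company" →
    ∀ p ∈ PySem.List.enumerate kv.2, p.2 = company_name →
      ∀ kv' ∈ (PySem.Dict.ofList data_dict).items, p.1 < (kv'.2.length : Int)
instance (data_dict : List (String × List String)) (company_name : String) : Decidable (Pre_company_summary_prompt data_dict company_name) := by unfold Pre_company_summary_prompt; infer_instance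

def pvWitness_company_summary_prompt : (List (String × List String)) × String :=
  ([("Name of The Company", ["Acme", "Beta"]), ("Name of The Student", ["ann", "bob"])], "Acme")

def Spec_company_summary_prompt (data_dict : List (String × List String)) (company_name : String) (out : String) : Prop := out = company_summary_prompt_alt data_dict company_name
instance (data_dict : List (String × List String)) (company_name : String) (out : String) : Decidable (Spec_company_summary_prompt data_dict company_name out) := by unfold Spec_company_summary_prompt; infer_instance

-- ===== CLAIM (what is proved, stated in full; the proofs are below) =====
def Claim_equal_company_summary_prompt : Prop := ∀ (data_dict : List (String × List String)) (company_name : String), Dom_company_summary_prompt data_dict company_name → Pre_company_summary_prompt data_dict company_name → Spec_company_summary_prompt data_dict company_name (company_summary_prompt data_dict company_name)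

-- ===== LEMMAS AND PROOFS =====

-- getD after A's initialisation loop: always the default [].
theorem getD_init_loop (ks : List String) (fb : PySem.Dict String (List String))
    (h : ∀ k, fb.getD k [] = []) (k : String) :
    (ks.foldl (fun fb k => fb.insert k ([] : List String)) fb).getD k [] = [] := by
  induction ks generalizing fb with
  | nil => exact h k
  | cons k' ks ih =>
    simp only [List.foldl_cons]
    apply ih
    intro j
    rw [PySem.Dict.getD_insert]
    split <;> [rfl; exact h j]

-- keys of A's initialisation loop from empty, for Nodup ks.
theorem keys_init_loop (ks : List String) (hnd : ks.Nodup) :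
    (ks.foldl (fun fb k => fb.insert k ([] : List String)) PySem.Dict.empty).keys = ks := by
  have hfresh : ∀ a ∈ ks, (PySem.Dict.empty : PySem.Dict String (List String)).contains (id a) = false := by
    intro a _; exact PySem.Dict.contains_empty a
  have := PySem.Dict.items_foldl_insert_fresh (l := ks) (k := id)
      (v := fun _ => ([] : List String)) (d := PySem.Dict.empty) hfresh (by simpa using hnd)
  simp only [id] at this
  simp only [PySem.Dict.keys]
  rw [this]
  simp [PySem.Dict.empty, Function.comp_def]

-- getD through A's inner (per-row) loop over Nodup keys.
theorem getD_inner_loop (g : String → List String → List String)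
    (ks : List String) (hnd : ks.Nodup) (fb : PySem.Dict String (List String)) (k : String) :
    (ks.foldl (fun fb2 k' => fb2.modify k' [] (g k')) fb).getD k []
      = if k ∈ ks then g k (fb.getD k []) else fb.getD k [] := by
  induction ks generalizing fb with
  | nil => simp
  | cons k' ks ih =>
    simp only [List.foldl_cons]
    rw [ih (List.nodup_cons.mp hnd).2]
    by_cases hk : k ∈ ks
    · have hne : k ≠ k' := by
        rintro rfl; exact (List.nodup_cons.mp hnd).1 hk
      rw [PySem.Dict.getD_modify, if_neg hne]
      simp [hk]
    · by_cases he : k = k'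
      · subst he; simp [hk]
      · simp [hk, he, PySem.Dict.getD_modify]

-- keys are preserved by the inner loop when every modified key is already present.
theorem keys_inner_loop (g : String → List String → List String)
    (ks : List String) (fb : PySem.Dict String (List String)) (h : ∀ k ∈ ks, k ∈ fb.keys) :
    (ks.foldl (fun fb2 k' => fb2.modify k' [] (g k')) fb).keys = fb.keys := by
  induction ks generalizing fb with
  | nil => rfl
  | cons k' ks ih =>
    simp only [List.foldl_cons]
    have hc : fb.contains k' = true := (PySem.Dict.contains_iff_mem_keys fb k').mpr (h k' (by simp))
    have hkeys : (fb.modify k' [] (g k')).keys = fb.keys := by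
      rw [PySem.Dict.keys_modify, PySem.Dict.keys_insert_of_contains _ _ hc]
    rw [ih]
    · exact hkeys
    · intro a ha; rw [hkeys]; exact h a (by simp [ha])

-- keys are preserved by A's outer loop.
theorem keys_outer_loop (d : PySem.Dict String (List String)) (name : String)
    (ps : List (Int × String)) (fb : PySem.Dict String (List String))
    (h : fb.keys = d.keys) :
    (ps.foldl (fun fb p =>
        if p.2 == name then
          d.keys.foldl (fun fb2 k =>
            fb2.modify k [] (fun l => l ++ [PySem.List.pyGetD (d.getD k []) p.1 ""])) fb
        else fb) fb).keys = d.keys := by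
  induction ps generalizing fb with
  | nil => exact h
  | cons p ps ih =>
    simp only [List.foldl_cons]
    by_cases hp : (p.2 == name) = true
    · simp only [hp, if_true]
      apply ih
      rw [keys_inner_loop]
      · exact h
      · intro a ha; rw [h]; exact ha
    · simp only [hp]; exact ih fb h

-- getD through A's outer loop, for a key of d.
theorem getD_outer_loop (d : PySem.Dict String (List String)) (name : String)
    (hnd : d.keys.Nodup)
    (ps : List (Int × String)) (fb : PySem.Dict String (List String)) (k : String)
    (hk : k ∈ d.keys) :
    (ps.foldl (fun fb p =>
        if p.2 == name then
          d.keys.foldl (fun fb2 k =>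
            fb2.modify k [] (fun l => l ++ [PySem.List.pyGetD (d.getD k []) p.1 ""])) fb
        else fb) fb).getD k []
      = fb.getD k [] ++ (ps.filter (fun p => p.2 == name)).map (fun p => PySem.List.pyGetD (d.getD k []) p.1 "") := by
  induction ps generalizing fb with
  | nil => simp
  | cons p ps ih =>
    simp only [List.foldl_cons, List.filter_cons]
    by_cases hp : (p.2 == name) = true
    · simp only [hp, if_true, List.map_cons]
      rw [ih]
      rw [getD_inner_loop _ _ hnd]
      simp [hk]
    · simp only [hp]
      exact ih fb

-- characterisation of A's feedback dict: its items are the items of d with each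
-- column restricted to the matching row indices.
theorem a_items_char (data_dict : List (String × List String)) (company_name : String) :
    (let d := PySem.Dict.ofList data_dict
     let company_column := d.getD "Name of The Company" []
     ((PySem.List.enumerate company_column).foldl
       (fun fb p =>
         if p.2 == company_name then
           d.keys.foldl (fun fb2 k =>
             fb2.modify k [] (fun l => l ++ [PySem.List.pyGetD (d.getD k []) p.1 ""])) fb
         else fb)
       (d.keys.foldl (fun fb k => fb.insert k ([] : List String)) PySem.Dict.empty)).items)
    = (let d := PySem.Dict.ofList data_dict
       let company_column := d.getD "Name of The Company" []
       let indices := ((PySem.List.enumerate company_column).filter (fun p => p.2 == company_name)).map (fun p => p.1)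
       d.items.map (fun kv => (kv.1, indices.map (fun i => PySem.List.pyGetD kv.2 i "")))) := by
  simp only
  have hnd : (PySem.Dict.ofList data_dict).keys.Nodup := PySem.Dict.nodup_keys_ofList data_dict
  set d := PySem.Dict.ofList data_dict
  have hkeys0 := keys_init_loop d.keys hnd
  have hkeysA := keys_outer_loop d company_name
      (PySem.List.enumerate (d.getD "Name of The Company" [])) _ hkeys0
  rw [PySem.Dict.items_eq_map_keys _ (by rw [hkeysA]; exact hnd) ([] : List String), hkeysA,
      PySem.Dict.items_eq_map_keys d hnd ([] : List String), List.map_map]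
  apply List.map_congr_left
  intro k hk
  rw [getD_outer_loop d company_name hnd _ _ k hk,
      getD_init_loop d.keys _ (fun j => PySem.Dict.getD_empty j ([] : List String)) k]
  simp [List.map_map, Function.comp_def]

-- a filter over range m equals the filter over range n when nothing matches in [n, m).
theorem filter_range_eq (P : Nat → Bool) (n m : Nat) (hnm : n ≤ m)
    (h : ∀ k, n ≤ k → k < m → P k = false) :
    (List.range m).filter P = (List.range n).filter P := by
  have hm : m = n + (m - n) := by omega
  rw [hm, List.range_add, List.filter_append]
  have : ((List.range (m - n)).map (n + ·)).filter P = [] := by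
    rw [List.filter_eq_nil_iff]
    intro a ha
    obtain ⟨j, hj, rfl⟩ := List.mem_map.mp ha
    simp only [List.mem_range] at hj
    simp [h (n + j) (by omega) (by omega)]
  rw [this, List.append_nil]

-- the matching row indices, as a filter over range of the column length.
theorem indices_char (cc : List String) (name : String) :
    ((PySem.List.enumerate cc).filter (fun p => p.2 == name)).map (fun p => p.1)
      = ((List.range cc.length).filter (fun k => cc.getD k "" == name)).map (fun (k : Nat) => (k : Int)) := by
  rw [PySem.List.enumerate_eq_map_pyRange cc "", PySem.List.len_eq,
      PySem.List.pyRange_zero_natCast, List.map_map, List.filter_map, List.map_map]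
  simp only [Function.comp_def, PySem.List.pyGetD_natCast]

-- ===== VERDICT (by name: the statement is the Claim_ definition above) =====
theorem company_summary_prompt_spec : Claim_equal_company_summary_prompt := by
  intro data_dict company_name _ hpre
  obtain ⟨hC, _, hB⟩ := hpre
  unfold Spec_company_summary_prompt company_summary_prompt company_summary_prompt_alt
  have hnd : (PySem.Dict.ofList data_dict).keys.Nodup := PySem.Dict.nodup_keys_ofList data_dict
  set d := PySem.Dict.ofList data_dict with hd
  -- the company-name key has a position ci in the key list
  obtain ⟨ci, hci⟩ : ∃ ci, PySem.List.index? d.keys "Name of The Company" = some ci := by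
    have := (PySem.List.index?_isSome_iff (xs := d.keys) (v := "Name of The Company")).mpr hC
    exact Option.isSome_iff_exists.mp this
  obtain ⟨hcilt, hcik, _⟩ := PySem.List.getElem_of_index?_eq_some hci
  simp only [hci]
  rw [a_items_char data_dict company_name]
  simp only
  set cc := d.getD "Name of The Company" [] with hcc
  set name := company_name
  -- facts about items / keys / values
  have hitems := PySem.Dict.items_eq_map_keys d hnd ([] : List String)
  have hvals := PySem.Dict.values_eq_map_keys d hnd ([] : List String)
  have hlenv : d.values.length = d.keys.length := by rw [hvals, List.length_map]
  have hccmem : cc ∈ d.values := by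
    rw [hvals]; exact List.mem_map.mpr ⟨_, hC, rfl⟩
  -- n = shortest column; n ≤ cc.length and every matching row index is < n
  set n := (((d.values).map List.length).min?).getD 0 with hn
  obtain ⟨a, ha⟩ : ∃ a, ((d.values).map List.length).min? = some a := by
    have hne : ((d.values).map List.length) ≠ [] := by
      simp only [ne_eq, List.map_eq_nil_iff]
      intro h; rw [h] at hccmem; simp at hccmem
    cases hmin : ((d.values).map List.length).min? with
    | none => exact absurd (List.min?_eq_none_iff.mp hmin) hne
    | some a => exact ⟨a, rfl⟩
  obtain ⟨hamem, hale⟩ := List.min?_eq_some_iff.mp ha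
  have hna : n = a := by rw [hn, ha]; rfl
  have hnm : n ≤ cc.length := by
    rw [hna]; exact hale _ (List.mem_map.mpr ⟨cc, hccmem, rfl⟩)
  have hmatch : ∀ k, k < cc.length → (cc.getD k "" == name) = true → k < n := by
    intro k hk hmk
    have hccitems : ("Name of The Company", cc) ∈ d.items := by
      rw [hitems]; exact List.mem_map.mpr ⟨_, hC, rfl⟩
    have hp : ((k : Int), cc[k]) ∈ PySem.List.enumerate cc :=
      (PySem.List.mem_enumerate_iff _ _ _).mpr ⟨k, hk, by simp⟩
    have hval : cc[k] = name := by
      have := of_decide_eq_true (by simpa [List.getD_eq_getElem?_getD, List.getElem?_eq_getElem hk] using hmk)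
      exact this
    have hlt := hB _ hccitems rfl _ hp hval
    rw [hna]
    obtain ⟨col, hcol, rfl⟩ := List.mem_map.mp hamem
    have hcolitems : ∃ kv' ∈ d.items, kv'.2 = col := by
      rw [hvals] at hcol
      obtain ⟨kk, hkk, rfl⟩ := List.mem_map.mp hcol
      exact ⟨(kk, d.getD kk []), by rw [hitems]; exact List.mem_map.mpr ⟨kk, hkk, rfl⟩, rfl⟩
    obtain ⟨kv', hkv', hkv2⟩ := hcolitems
    have h2 : (k : Int) < (col.length : Int) := by simpa [hkv2] using hlt kv' hkv'
    exact_mod_cast h2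
  -- per-column equality of the two filtered slices
  have hcol_eq : ∀ col, col ∈ d.values →
      ((((PySem.List.enumerate cc).filter (fun p => p.2 == name)).map (fun p => p.1)).map
        (fun i => PySem.List.pyGetD col i ""))
      = ((List.range n).filter (fun k => cc.getD k "" == name)).map (fun k => col.getD k "") := by
    intro col _
    rw [indices_char, List.map_map]
    rw [filter_range_eq _ n cc.length hnm (fun k hnk hkm => by
      by_contra hne
      have := hmatch k hkm (by simpa using Bool.of_not_eq_false hne)
      omega)]
    simp [Function.comp_def]
  -- row predicate = company-column predicate
  have hcolci : d.values[ci]? = some cc := by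
    rw [hvals, List.getElem?_map, List.getElem?_eq_getElem hcilt]
    simp only [Option.map_some, hcik]
    rfl
  have hpred : ∀ i, i < n →
      (PySem.List.pyGetD ((d.values).map (fun c => c.getD i "")) (ci : Int) "" == name)
        = (cc.getD i "" == name) := by
    intro i _
    rw [PySem.List.pyGetD_natCast]
    rw [List.getD_eq_getElem?_getD, List.getElem?_map, hcolci]
    simp
  -- now the two item lists agree elementwise
  apply congrArg (fun its => promptText name (pyReprFeedback its))
  rw [hitems, List.map_map]
  apply List.ext_getElem
  · simp [PySem.List.length_enumerate]
  intro j hj hj'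
  simp only [List.getElem_map]
  have hjk : j < d.keys.length := by simpa [PySem.List.length_enumerate] using hj
  have henum : (PySem.List.enumerate d.keys)[j]'(by simpa [PySem.List.length_enumerate] using hjk)
      = ((j : Int), d.keys[j]) := by
    simpa using PySem.List.getElem_enumerate d.keys 0 j (by simpa using hjk)
  rw [henum]
  refine Prod.ext (by simp [Function.comp_def]) ?_
  -- value component
  simp only [Function.comp_def]
  rw [hcol_eq (d.getD (d.keys[j]) []) (by rw [hvals]; exact List.mem_map.mpr ⟨_, by simp, rfl⟩)]
  unfold pyZipStar
  rw [← hn]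
  rw [List.filter_map, List.map_map]
  have hfc : List.filter ((fun row => PySem.List.pyGetD row ((ci : Nat) : Int) "" == name) ∘ fun i => List.map (fun c => c.getD i "") d.values) (List.range n)
      = List.filter (fun i => cc.getD i "" == name) (List.range n) := by
    apply List.filter_congr
    intro i hi
    simpa [Function.comp_def] using hpred i (List.mem_range.mp hi)
  rw [hfc]
  apply List.map_congr_left
  intro i hi
  simp only [Function.comp_def, PySem.List.pyGetD_natCast]
  conv_rhs => rw [List.getD_eq_getElem?_getD, List.getElem?_map,
      List.getElem?_eq_getElem (show j < d.values.length from hlenv ▸ hjk)]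
  simp only [Option.map_some, Option.getD_some]
  congr 1
  rw [eq_comm, List.getElem_eq_iff, hvals, List.getElem?_map, List.getElem?_eq_getElem hjk]
  simp
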